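-- pv_equiv track=rewrite | github.com/pablokan/prog1 | alumnos/practico3/reviglio/practicoTresLectura_Reviglio.py | splitear
-- ===== SOURCE A (Python) =====
-- def splitear(lista,valor):
--     l=[]
--     l2=[]
--     x=lista[0].split(valor)
--     c=0
--     for i in range(len(x)):
--         if c==0:
--             l.append(x[i])
--             c=1
--         else:
--             l2.append(x[i])
--             c=0
--     return l, l2
-- ===== SOURCE B (Python) =====
-- def splitear(lista, valor):
--     x = lista[0].split(valor)
--     return x[0::2], x[1::2]
-- ===== Notes on version B (the rewrite author's own statement) =====
-- stated objective: simpler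
-- what changed: Replaces the index loop with its toggle flag and two append accumulators by one split followed by two strided slices x[0::2] and x[1::2].
import Mathlib
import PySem

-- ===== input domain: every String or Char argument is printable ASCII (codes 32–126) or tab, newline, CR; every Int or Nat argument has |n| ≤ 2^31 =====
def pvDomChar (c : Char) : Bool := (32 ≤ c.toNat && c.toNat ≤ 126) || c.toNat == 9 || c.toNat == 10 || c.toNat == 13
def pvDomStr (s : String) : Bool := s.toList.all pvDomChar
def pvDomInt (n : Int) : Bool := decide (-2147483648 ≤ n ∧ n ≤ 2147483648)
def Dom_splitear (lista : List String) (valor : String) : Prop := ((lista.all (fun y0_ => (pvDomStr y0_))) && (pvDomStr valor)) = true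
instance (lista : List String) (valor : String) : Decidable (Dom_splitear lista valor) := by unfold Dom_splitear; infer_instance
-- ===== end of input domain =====

-- B replaces A's index loop with its toggle flag by one split and two strided slices (objective: simpler).

-- ===== PORT A =====
-- l=[]; l2=[]; x=lista[0].split(valor); c=0; for i in range(len(x)): toggle-append; return l, l2
def splitear (lista : List String) (valor : String) : List String × List String :=
  let l : List String := []
  let l2 : List String := []
  let x : List String := (PySem.Str.split? ((PySem.List.pyGet? lista 0).getD "") valor).getD []
  let r := (PySem.List.pyRange 0 (PySem.List.len x) 1).foldl
    (fun (acc : List String × List String × Int) i =>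
      if acc.2.2 == 0 then (acc.1 ++ [PySem.List.pyGetD x i ""], acc.2.1, (1 : Int))
      else (acc.1, acc.2.1 ++ [PySem.List.pyGetD x i ""], (0 : Int)))
    (l, l2, (0 : Int))
  (r.1, r.2.1)

-- ===== PORT B =====
-- x = lista[0].split(valor); return x[0::2], x[1::2]
def splitear_alt (lista : List String) (valor : String) : List String × List String :=
  let x : List String := (PySem.Str.split? ((PySem.List.pyGet? lista 0).getD "") valor).getD []
  ((PySem.List.slice? x (some 0) none 2).getD [], (PySem.List.slice? x (some 1) none 2).getD [])

-- ===== PRECONDITION & SPEC =====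
-- Pre_ excludes exactly the inputs where A raises: lista = [] (IndexError on lista[0]) and valor = "" (ValueError in split).
def Pre_splitear (lista : List String) (valor : String) : Prop := lista ≠ [] ∧ valor ≠ ""
instance (lista : List String) (valor : String) : Decidable (Pre_splitear lista valor) := by unfold Pre_splitear; infer_instance
def pvWitness_splitear : List String × String := (["a,b,c"], ",")

def Spec_splitear (lista : List String) (valor : String) (out : List String × List String) : Prop := out = splitear_alt lista valor
instance (lista : List String) (valor : String) (out : List String × List String) : Decidable (Spec_splitear lista valor out) := by unfold Spec_splitear; infer_instance

-- ===== CLAIM (what is proved, stated in full; the proofs are below) =====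
def Claim_equal_splitear : Prop := ∀ (lista : List String) (valor : String), Dom_splitear lista valor → Pre_splitear lista valor → Spec_splitear lista valor (splitear lista valor)

-- ===== LEMMAS AND PROOFS =====

-- the even-position / odd-position elements of a list
def pvParity : List String → List String × List String
  | [] => ([], [])
  | a :: t => ((a :: (pvParity t).2), (pvParity t).1)

-- A's toggle loop, from flag 0 and from flag 1
theorem pvLoop_eq (x : List String) : ∀ (l l2 : List String),
    (x.foldl (fun (acc : List String × List String × Int) s =>
        if acc.2.2 == 0 then (acc.1 ++ [s], acc.2.1, (1 : Int))
        else (acc.1, acc.2.1 ++ [s], (0 : Int))) (l, l2, (0 : Int)))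
      = (l ++ (pvParity x).1, l2 ++ (pvParity x).2, ((x.length % 2 : Nat) : Int)) ∧
    (x.foldl (fun (acc : List String × List String × Int) s =>
        if acc.2.2 == 0 then (acc.1 ++ [s], acc.2.1, (1 : Int))
        else (acc.1, acc.2.1 ++ [s], (0 : Int))) (l, l2, (1 : Int)))
      = (l ++ (pvParity x).2, l2 ++ (pvParity x).1, (((x.length + 1) % 2 : Nat) : Int)) := by
  induction x with
  | nil => intro l l2; simp [pvParity]
  | cons a t ih =>
    intro l l2
    constructor
    · simp only [List.foldl_cons]
      rw [if_pos (by decide), (ih (l ++ [a]) l2).2]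
      simp [pvParity]
    · simp only [List.foldl_cons]
      rw [if_neg (by decide), (ih l (l2 ++ [a])).1]
      simp [pvParity]
      omega

theorem pvFm_eq (x : List String) :
    (List.range ((x.length + 1) / 2)).filterMap (fun k => x[2 * k]?) = (pvParity x).1 ∧
    (List.range (x.length / 2)).filterMap (fun k => x[2 * k + 1]?) = (pvParity x).2 := by
  induction x with
  | nil => simp [pvParity]
  | cons a t ih =>
    constructor
    · have hcount : ((a :: t).length + 1) / 2 = t.length / 2 + 1 := by
        rw [List.length_cons]; omega
      rw [hcount, List.range_succ_eq_map, List.filterMap_cons, List.filterMap_map]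
      simp only [Nat.mul_zero, List.getElem?_cons_zero]
      have h2 : (fun k => (a :: t)[2 * k]?) ∘ Nat.succ = fun k => t[2 * k + 1]? := by
        funext k
        simp only [Function.comp]
        have h3 : 2 * Nat.succ k = 2 * k + 1 + 1 := by omega
        rw [h3, List.getElem?_cons_succ]
      rw [h2, ih.2]
      simp [pvParity]
    · have hcount : (a :: t).length / 2 = (t.length + 1) / 2 := by
        rw [List.length_cons]
      rw [hcount]
      have h2 : (fun k => (a :: t)[2 * k + 1]?) = fun k => t[2 * k]? := by
        funext k; exact List.getElem?_cons_succ
      rw [h2, ih.1]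
      simp [pvParity]

theorem pvSlice0_eq (x : List String) :
    PySem.List.slice? x (some 0) none 2 = some (pvParity x).1 := by
  cases x with
  | nil => decide
  | cons a t =>
    simp only [PySem.List.slice?, PySem.List.sliceIndices]
    simp only [show ¬((2:Int) < 0) from by norm_num, show ¬((0:Int) < 0) from by norm_num,
      show ¬((2:Int) = 0) from by norm_num, show ((0:Int) < 2) from by norm_num, if_false, if_true]
    rw [show min (0:Int) ↑(a :: t).length = 0 from by omega]
    rw [if_pos (by rw [List.length_cons]; push_cast; omega)]
    rw [show (((a :: t).length : Int) - 0 + 2 - 1) = ((((a :: t).length + 1 : Nat)) : Int) from by push_cast; ring]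
    rw [show ((((a :: t).length + 1 : Nat) : Int) / 2).toNat = ((a :: t).length + 1) / 2 from by omega]
    congr 1
    calc (List.range (((a :: t).length + 1) / 2)).filterMap (fun k : ℕ => (a :: t)[((0:Int) + 2 * (k:Int)).toNat]?)
        = (List.range (((a :: t).length + 1) / 2)).filterMap (fun k => (a :: t)[2 * k]?) := by
          apply List.filterMap_congr; intro k _
          rw [show ((0:Int) + 2 * (k:Int)).toNat = 2 * k from by omega]
      _ = (pvParity (a :: t)).1 := (pvFm_eq (a :: t)).1

theorem pvSlice1_eq (x : List String) :
    PySem.List.slice? x (some 1) none 2 = some (pvParity x).2 := by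
  cases x with
  | nil => decide
  | cons a t =>
    simp only [PySem.List.slice?, PySem.List.sliceIndices]
    simp only [show ¬((2:Int) < 0) from by norm_num, show ¬((1:Int) < 0) from by norm_num,
      show ¬((2:Int) = 0) from by norm_num, show ((0:Int) < 2) from by norm_num, if_false, if_true]
    rw [show min (1:Int) ↑(a :: t).length = 1 from by rw [List.length_cons]; push_cast; omega]
    by_cases h : (1:Int) < ↑(a :: t).length
    · rw [if_pos h]
      rw [show (((a :: t).length : Int) - 1 + 2 - 1) = (((a :: t).length : Nat) : Int) from by ring]
      rw [show ((((a :: t).length : Nat) : Int) / 2).toNat = (a :: t).length / 2 from by omega]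
      congr 1
      calc (List.range ((a :: t).length / 2)).filterMap (fun k : ℕ => (a :: t)[((1:Int) + 2 * (k:Int)).toNat]?)
          = (List.range ((a :: t).length / 2)).filterMap (fun k => (a :: t)[2 * k + 1]?) := by
            apply List.filterMap_congr; intro k _
            rw [show ((1:Int) + 2 * (k:Int)).toNat = 2 * k + 1 from by omega]
        _ = (pvParity (a :: t)).2 := (pvFm_eq (a :: t)).2
    · rw [if_neg h]
      have ht : t = [] := by
        cases t with
        | nil => rfl
        | cons b u => exfalso; apply h; rw [List.length_cons, List.length_cons]; push_cast; omega
      subst ht; simp [pvParity]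

-- ===== VERDICT (by name: the statement is the Claim_ definition above) =====
theorem splitear_spec : Claim_equal_splitear := by
  intro lista valor _ _
  unfold Spec_splitear splitear splitear_alt
  dsimp only
  set x : List String := (PySem.Str.split? ((PySem.List.pyGet? lista 0).getD "") valor).getD [] with hx
  rw [PySem.List.foldl_pyRange_zero_pyGetD x ""
    (fun (acc : List String × List String × Int) s =>
      if acc.2.2 == 0 then (acc.1 ++ [s], acc.2.1, (1 : Int))
      else (acc.1, acc.2.1 ++ [s], (0 : Int))) ([], [], 0)]
  rw [(pvLoop_eq x [] []).1, pvSlice0_eq x, pvSlice1_eq x]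
  simp
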